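-- pv_equiv track=rewrite | github.com/rainfanlol/YouLiang-repo | Python/development project/SW_info/function_checkstatus.py | TitleStatus
-- ===== SOURCE A (Python) =====
-- def TitleStatus(Lis):
--  ReSult = 0
--  Lis=[int(i) for i in Lis]
--  for i in range(len(Lis)):
--   if (Lis[i] == 3 and ReSult !=1):
--      ReSult = 3
--      continue
--   elif (Lis[i] == 1 ):
--      ReSult = 1
--      continue
--   elif (Lis[i] == 2 ):
--      ReSult = 2
--      return ReSult
--      break
--   else:
--      continue
--  return ReSult
-- ===== SOURCE B (Python) =====
-- def TitleStatus(Lis):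
--     Lis = [int(i) for i in Lis]
--     if 2 in Lis:
--         return 2
--     if 1 in Lis:
--         return 1
--     if 3 in Lis:
--         return 3
--     return 0
-- ===== Notes on version B (the rewrite author's own statement) =====
-- stated objective: simpler
-- what changed: Replaced the stateful indexed loop (with precedence guard ReSult!=1 and early return) by three priority membership checks: 2 wins, then 1, then 3, else 0.
import Mathlib
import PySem

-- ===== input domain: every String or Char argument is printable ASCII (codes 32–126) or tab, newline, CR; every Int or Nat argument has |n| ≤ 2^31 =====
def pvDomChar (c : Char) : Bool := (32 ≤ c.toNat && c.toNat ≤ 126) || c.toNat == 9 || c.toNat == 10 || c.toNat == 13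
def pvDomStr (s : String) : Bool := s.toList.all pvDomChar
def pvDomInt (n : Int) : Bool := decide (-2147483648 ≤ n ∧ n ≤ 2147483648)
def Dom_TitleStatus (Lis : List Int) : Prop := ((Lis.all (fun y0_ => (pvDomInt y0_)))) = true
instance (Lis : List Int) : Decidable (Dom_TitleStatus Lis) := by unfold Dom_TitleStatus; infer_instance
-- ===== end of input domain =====

-- B is a simpler priority-membership rewrite of A's stateful loop; return values only (A rebinds its local Lis, not observable).

-- ===== PORT A =====
-- A's for-loop over indices with state ReSult and an early return on 2, as structural recursion over the list.
def TitleStatusLoop (xs : List Int) (ReSult : Int) : Int :=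
  match xs with
  | [] => ReSult
  | x :: rest =>
    if x = 3 ∧ ReSult ≠ 1 then TitleStatusLoop rest 3
    else if x = 1 then TitleStatusLoop rest 1
    else if x = 2 then 2
    else TitleStatusLoop rest ReSult

def TitleStatus (Lis : List Int) : Int := TitleStatusLoop Lis 0

-- ===== PORT B =====
def TitleStatus_alt (Lis : List Int) : Int :=
  if Lis.contains 2 then 2
  else if Lis.contains 1 then 1
  else if Lis.contains 3 then 3
  else 0

-- ===== PRECONDITION & SPEC =====
def Spec_TitleStatus (Lis : List Int) (out : Int) : Prop := out = TitleStatus_alt Lis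
instance (Lis : List Int) (out : Int) : Decidable (Spec_TitleStatus Lis out) := by unfold Spec_TitleStatus; infer_instance

-- ===== CLAIM (what is proved, stated in full; the proofs are below) =====
def Claim_equal_TitleStatus : Prop := ∀ (Lis : List Int), Dom_TitleStatus Lis → Spec_TitleStatus Lis (TitleStatus Lis)

-- ===== LEMMAS AND PROOFS =====
theorem TitleStatusLoop_char (xs : List Int) : ∀ (r : Int),
    TitleStatusLoop xs r =
      if xs.contains 2 then 2
      else if r = 1 ∨ xs.contains 1 then 1
      else if xs.contains 3 then 3
      else r := by
  induction xs with
  | nil => intro r; simp [TitleStatusLoop]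
  | cons x rest ih =>
    intro r
    simp only [TitleStatusLoop, List.contains_cons, ih]
    by_cases h2 : x = 2 <;> by_cases h1 : x = 1 <;> by_cases h3 : x = 3 <;>
      simp_all <;> split_ifs <;> simp_all

-- ===== VERDICT (by name: the statement is the Claim_ definition above) =====
theorem TitleStatus_spec : Claim_equal_TitleStatus := by
  intro Lis _
  show TitleStatus Lis = TitleStatus_alt Lis
  simp only [TitleStatus, TitleStatus_alt, TitleStatusLoop_char]
  split_ifs <;> simp_all
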